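-- pv_equiv track=rewrite | github.com/chanwoong114/Coding_practice | algorithm/6. Start/Start2/암호코드_스캔.py | cut2
-- ===== SOURCE A (Python) =====
-- def cut2(s):
--     c_check = 0
--     z_check = 0
--     cutting = []
--     start = 0
--
--     for aa in range(len(s)):
--         if s[aa] != '0':
--             c_check = 1
--             z_check = 0
--         if c_check and s[aa] == '0':
--             z_check += 1
--
--         if z_check == 3:
--             cutting.append(s[start:aa + 1])
--             start = aa
--             c_check = 0
--             z_check = 0
--     cutting.append(s[start:])
--
--     return cutting
-- ===== SOURCE B (Python) =====
-- def cut2(s):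
--     # index the maximal zero-runs first, then slice once at the recorded cut points
--     cuts = []
--     n = len(s)
--     i = 0
--     while i < n:
--         if s[i] == '0':
--             j = i
--             while j < n and s[j] == '0':
--                 j += 1
--             if i > 0 and j - i >= 3:
--                 cuts.append(i + 2)
--             i = j
--         else:
--             i += 1
--     res = []
--     prev = 0
--     for p in cuts:
--         res.append(s[prev:p + 1])
--         prev = p
--     res.append(s[prev:])
--     return res
-- ===== Notes on version B (the rewrite author's own statement) =====
-- stated objective: alternative
-- what changed: B replaces A's per-character c_check/z_check state machine with a run-indexing scan: it first locates every maximal zero-run, records a cut index (run start + 2) for each non-leading run of length >= 3, and then builds the result by slicing once between consecutive cut points.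
import Mathlib
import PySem

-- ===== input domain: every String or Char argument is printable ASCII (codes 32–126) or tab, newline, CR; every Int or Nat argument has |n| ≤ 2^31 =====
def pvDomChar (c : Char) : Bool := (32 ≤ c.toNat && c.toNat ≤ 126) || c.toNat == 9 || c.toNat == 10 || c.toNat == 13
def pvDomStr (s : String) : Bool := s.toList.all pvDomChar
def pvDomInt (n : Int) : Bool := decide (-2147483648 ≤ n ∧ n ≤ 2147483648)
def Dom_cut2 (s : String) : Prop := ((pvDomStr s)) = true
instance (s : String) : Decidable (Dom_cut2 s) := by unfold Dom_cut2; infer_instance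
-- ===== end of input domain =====

-- B re-implements A's incremental c_check/z_check state machine by first indexing the maximal
-- zero-runs and recording cut points, then slicing once afterwards (objective: alternative).

-- ===== PORT A =====
-- one step of A's for-loop body; state = (c_check, z_check, cutting, start)
def cut2Step (s : String) (st : Int × Int × List String × Int) (aa : Int) :
    Int × Int × List String × Int :=
  let cz := if PySem.Str.pyGet? s aa ≠ some '0' then ((1 : Int), (0 : Int)) else (st.1, st.2.1)
  let z := if cz.1 ≠ 0 ∧ PySem.Str.pyGet? s aa = some '0' then cz.2 + 1 else cz.2
  if z = 3 then
    (0, 0, st.2.2.1 ++ [PySem.Str.slice s (some st.2.2.2) (some (aa + 1))], aa)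
  else
    (cz.1, z, st.2.2.1, st.2.2.2)

def cut2 (s : String) : List String :=
  let st := (PySem.List.pyRange 0 (PySem.Str.len s) 1).foldl (cut2Step s) (0, 0, [], 0)
  st.2.2.1 ++ [PySem.Str.slice s (some st.2.2.2) none]

-- ===== PORT B =====
-- inner while: length of the leading run of '0's
def zRun : List Char → Nat
  | [] => 0
  | c :: rest => if c = '0' then zRun rest + 1 else 0

-- outer while over the suffix starting at index i: collect the cut positions
def cutsScan : List Char → Nat → List Nat
  | [], _ => []
  | c :: rest, i =>
    if c = '0' then
      let k := zRun (c :: rest)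
      (if 0 < i ∧ 3 ≤ k then [i + 2] else []) ++ cutsScan ((c :: rest).drop k) (i + k)
    else
      cutsScan rest (i + 1)
  termination_by l _ => l.length
  decreasing_by
    · have h1 : 0 < zRun (c :: rest) := by simp [zRun, *]
      have h2 : 0 < (c :: rest).length := by simp
      simp only [List.length_drop]; omega
    · simp
  -- (the 'if c = 0' branch drops k = zRun ≥ 1 elements)

-- the final for-loop over the cut list: slice between consecutive cut points
def buildB (s : String) (prev : Int) : List Nat → List String
  | [] => [PySem.Str.slice s (some prev) none]
  | p :: rest => PySem.Str.slice s (some prev) (some ((p : Int) + 1)) :: buildB s (p : Int) rest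

def cut2_alt (s : String) : List String :=
  buildB s 0 (cutsScan s.toList 0)

-- ===== PRECONDITION & SPEC =====
def Spec_cut2 (s : String) (out : List String) : Prop := out = cut2_alt s
instance (s : String) (out : List String) : Decidable (Spec_cut2 s out) := by unfold Spec_cut2; infer_instance

-- ===== CLAIM (what is proved, stated in full; the proofs are below) =====
def Claim_equal_cut2 : Prop := ∀ (s : String), Dom_cut2 s → Spec_cut2 s (cut2 s)

-- ===== LEMMAS AND PROOFS =====

-- proof-side mirror of A's loop: the cut positions it will record from index i onward
def cutsA (l : List Char) (c z : Int) (i : Nat) : List Nat :=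
  if h : i < l.length then
    if l[i] = '0' then
      let z' := if c ≠ 0 then z + 1 else z
      if z' = 3 then i :: cutsA l 0 0 (i + 1) else cutsA l c z' (i + 1)
    else cutsA l 1 0 (i + 1)
  else []
  termination_by l.length - i

-- zRun really is the leading zero-run: zeros strictly before it …
theorem zRun_zero (l : List Char) (j : Nat) (hj : j < zRun l) : l[j]? = some '0' := by
  induction l generalizing j with
  | nil => simp [zRun] at hj
  | cons c rest ih =>
    by_cases hc : c = '0'
    · cases j with
      | zero => simp [hc]
      | succ j =>
        simp [zRun, hc] at hj
        simpa using ih j (by omega)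
    · simp [zRun, hc] at hj

-- … and a non-zero (or the end) right after it
theorem zRun_stop (l : List Char) : l[zRun l]? ≠ some '0' := by
  induction l with
  | nil => simp
  | cons c rest ih =>
    by_cases hc : c = '0'
    · simpa [zRun, hc] using ih
    · simp [zRun, hc]

-- the state (c_check, z_check) is irrelevant at the end or at a non-zero character
theorem cutsA_state_irrel (l : List Char) (c z c' z' : Int) (i : Nat)
    (h : l[i]? ≠ some '0') : cutsA l c z i = cutsA l c' z' i := by
  unfold cutsA
  split
  · next hi =>
    have hne : l[i] ≠ '0' := by
      intro he; exact h (by simp [List.getElem?_eq_getElem hi, he])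
    simp [hne]
  · rfl

-- with c_check = 0, a stretch of zeros is skipped without changing the state
theorem cutsA_skip (l : List Char) (d : Nat) : ∀ (i m : Nat), m = i + d →
    (∀ j, i ≤ j → j < m → l[j]? = some '0') →
    cutsA l 0 0 i = cutsA l 0 0 m := by
  induction d with
  | zero => intro i m hm _; subst hm; rfl
  | succ d ih =>
    intro i m hm hz
    have h0 : l[i]? = some '0' := hz i le_rfl (by omega)
    obtain ⟨hil, hgi⟩ := List.getElem?_eq_some_iff.1 h0
    rw [cutsA]
    simp only [hil, dif_pos, hgi, if_pos]
    norm_num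
    exact ih (i + 1) m (by omega) (fun j h1 h2 => hz j (by omega) h2)

-- with c_check = 1 and z_check = z, a run of k zeros followed by a non-zero (or the end)
-- records a cut exactly when z + k reaches 3, at position i + 2 - z
theorem cutsA_run (l : List Char) (k : Nat) : ∀ (i : Nat) (z : Int), (z = 0 ∨ z = 1 ∨ z = 2) →
    (∀ j, i ≤ j → j < i + k → l[j]? = some '0') → l[i + k]? ≠ some '0' →
    cutsA l 1 z i = (if 3 ≤ z + (k : Int) then [i + 2 - z.toNat] else []) ++ cutsA l 1 0 (i + k) := by
  induction k with
  | zero =>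
    intro i z hz _ hstop
    have h3 : ¬ ((3 : Int) ≤ z + ((0 : Nat) : Int)) := by rcases hz with h|h|h <;> simp [h]
    rw [if_neg h3, List.nil_append, Nat.add_zero]
    exact cutsA_state_irrel l 1 z 1 0 i (by simpa using hstop)
  | succ k ih =>
    intro i z hz hrun hstop
    have h0 : l[i]? = some '0' := hrun i le_rfl (by omega)
    obtain ⟨hil, hgi⟩ := List.getElem?_eq_some_iff.1 h0
    rw [cutsA]
    simp only [hil, dif_pos, hgi, if_pos]
    simp only [show ((1 : Int) ≠ 0) = True by simp, if_pos]
    by_cases h3 : z + 1 = 3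
    · -- the cut fires here: z = 2, record i, state resets to (0, 0)
      have hz2 : z = 2 := by omega
      rw [if_pos h3]
      have hskip : cutsA l 0 0 (i + 1) = cutsA l 0 0 (i + (k + 1)) :=
        cutsA_skip l k (i + 1) (i + (k + 1)) (by omega)
          (fun j h1 h2 => hrun j (by omega) h2)
      have herase : cutsA l 0 0 (i + (k + 1)) = cutsA l 1 0 (i + (k + 1)) :=
        cutsA_state_irrel l 0 0 1 0 _ hstop
      rw [hskip, herase]
      have hc : (3 : Int) ≤ z + ((k : Int) + 1) := by omega
      rw [if_pos (by push_cast; omega)]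
      subst hz2
      norm_num
      omega
    · rw [if_neg h3]
      rw [ih (i + 1) (z + 1) (by rcases hz with h|h|h <;> omega)
        (fun j h1 h2 => hrun j (by omega) (by omega))
        (by rw [show i + 1 + k = i + (k + 1) by omega]; exact hstop)]
      rw [show i + 1 + k = i + (k + 1) by omega]
      have hidx : i + 1 + 2 - (z + 1).toNat = i + 2 - z.toNat := by
        rcases hz with h|h|h <;> simp [h]
      by_cases hc : (3 : Int) ≤ z + ((k : Nat) + 1 : Int)
      · rw [if_pos (by omega), if_pos (by omega), hidx]
      · rw [if_neg (by omega), if_neg (by omega)]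

-- A's cut positions from a positive index with a fresh non-zero behind it = B's run scan
theorem cutsA_eq_cutsScan (l : List Char) : ∀ (N : Nat) (t : List Char) (i : Nat),
    t.length ≤ N → t = l.drop i → 0 < i → cutsA l 1 0 i = cutsScan t i := by
  intro N
  induction N with
  | zero =>
    intro t i hN ht hi
    have ht0 : t = [] := List.eq_nil_of_length_eq_zero (by omega)
    subst ht0
    have hlen : l.length ≤ i := by
      have := congrArg List.length ht
      simp [List.length_drop] at this
      omega
    rw [cutsA]
    simp [Nat.not_lt.2 hlen, cutsScan]
  | succ N ih =>
    intro t i hN ht hi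
    cases t with
    | nil =>
      have hlen : l.length ≤ i := by
        have := congrArg List.length ht
        simp [List.length_drop] at this
        omega
      rw [cutsA]
      simp [Nat.not_lt.2 hlen, cutsScan]
    | cons c rest =>
      have hidx : ∀ j : Nat, (c :: rest)[j]? = l[i + j]? := by
        intro j; rw [ht]; exact List.getElem?_drop
      by_cases hc : c = '0'
      · -- a zero-run of length k starts at i
        subst hc
        rw [cutsScan]
        simp only [if_pos]
        set k := zRun ('0' :: rest) with hk
        have hk1 : 0 < k := by simp [hk, zRun]
        have hrun : ∀ j, i ≤ j → j < i + k → l[j]? = some '0' := by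
          intro j h1 h2
          have := zRun_zero ('0' :: rest) (j - i) (by omega)
          rw [hidx (j - i), show i + (j - i) = j by omega] at this
          exact this
        have hstop : l[i + k]? ≠ some '0' := by
          have := zRun_stop ('0' :: rest)
          rw [hidx k] at this
          exact this
        rw [cutsA_run l k i 0 (by tauto) hrun hstop]
        have hrest : cutsA l 1 0 (i + k) = cutsScan ((('0' : Char) :: rest).drop k) (i + k) := by
          apply ih
          · simp at hN ⊢
            omega
          · have h2 := congrArg (List.drop k) ht
            simp only [List.drop_drop] at h2
            exact h2
          · omega
        rw [hrest]
        simp [hi, hk]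
      · rw [cutsScan]
        simp only [hc]
        have h0 : l[i]? = some c := by have h := hidx 0; simp at h; exact h.symm
        obtain ⟨hil, hgi⟩ := List.getElem?_eq_some_iff.1 h0
        rw [cutsA]
        simp only [hil, dif_pos, hgi, hc]
        apply ih
        · simp at hN; omega
        · have h2 := congrArg (List.drop 1) ht
          simp only [List.drop_drop] at h2
          simpa using h2
        · omega

-- … and from the initial state (c_check = 0) the leading run is skipped on both sides
theorem cutsA_init (l : List Char) : cutsA l 0 0 0 = cutsScan l 0 := by
  cases l with
  | nil => rw [cutsA]; simp [cutsScan]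
  | cons c rest =>
    by_cases hc : c = '0'
    · subst hc
      set k := zRun ('0' :: rest) with hk
      have hk1 : 0 < k := by simp [hk, zRun]
      have hrun : ∀ j, 0 ≤ j → j < 0 + k → ('0' :: rest)[j]? = some '0' := by
        intro j _ h2
        exact zRun_zero ('0' :: rest) j (by omega)
      have hstop : ('0' :: rest)[0 + k]? ≠ some '0' := by
        simpa [hk] using zRun_stop ('0' :: rest)
      have hskip : cutsA ('0' :: rest) 0 0 0 = cutsA ('0' :: rest) 0 0 k :=
        cutsA_skip ('0' :: rest) k 0 k (by omega) (fun j h1 h2 => hrun j (by omega) (by omega))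
      have herase : cutsA ('0' :: rest) 0 0 k = cutsA ('0' :: rest) 1 0 k :=
        cutsA_state_irrel ('0' :: rest) 0 0 1 0 k (by simpa using hstop)
      rw [hskip, herase,
        cutsA_eq_cutsScan ('0' :: rest) ((('0' : Char) :: rest).drop k).length
          ((('0' : Char) :: rest).drop k) k le_rfl rfl hk1]
      rw [cutsScan]
      simp [hk]
    · rw [cutsScan]
      simp only [hc]
      rw [cutsA]
      have hil : 0 < (c :: rest).length := by simp
      have hgi : (c :: rest)[0] = c := rfl
      simp only [hil, dif_pos, hgi, hc]
      exact cutsA_eq_cutsScan (c :: rest) rest.length rest 1 le_rfl rfl (by omega)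

-- A's fold, run from index i in any state, appends exactly the slices B builds from cutsA
theorem fold_eq_build (s : String) : ∀ (m i : Nat) (c z start : Int) (cutting : List String),
    i + m = s.toList.length →
    (let st := (PySem.List.pyRange (i : Int) (PySem.Str.len s) 1).foldl (cut2Step s) (c, z, cutting, start);
     st.2.2.1 ++ [PySem.Str.slice s (some st.2.2.2) none]) =
      cutting ++ buildB s start (cutsA s.toList c z i) := by
  intro m
  induction m with
  | zero =>
    intro i c z start cutting hlen
    have hsl : s.toList.length = s.length := by simp
    have hnil : PySem.List.pyRange (i : Int) (PySem.Str.len s) 1 = [] :=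
      PySem.List.pyRange_one_eq_nil (by simp [pysem]; omega)
    rw [hnil, cutsA]
    rw [dif_neg (by omega : ¬ i < s.toList.length)]
    simp [buildB]
  | succ m ih =>
    intro i c z start cutting hlen
    have hsl : s.toList.length = s.length := by simp
    have hil : i < s.toList.length := by omega
    have hcons : PySem.List.pyRange (i : Int) (PySem.Str.len s) 1 =
        (i : Int) :: PySem.List.pyRange ((i : Int) + 1) (PySem.Str.len s) 1 :=
      PySem.List.pyRange_one_cons (by simp [pysem]; omega)
    have hget : PySem.Str.pyGet? s (i : Int) = some s.toList[i] := by
      simp [List.getElem?_eq_getElem hil]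
    have hcast : ((i : Int) + 1) = (((i + 1 : Nat)) : Int) := by push_cast; ring
    rw [cutsA]
    simp only [hil, dif_pos]
    by_cases hc : s.toList[i] = '0'
    · -- a zero: maybe increment z_check, maybe cut
      have hgl : s.toList[i]? = some '0' := by rw [List.getElem?_eq_getElem hil, hc]
      by_cases hcz : (if c ≠ 0 then z + 1 else z) = 3
      · rw [hcons]
        simp only [List.foldl_cons]
        have hstep : cut2Step s (c, z, cutting, start) (i : Int) =
            (0, 0, cutting ++ [PySem.Str.slice s (some start) (some ((i : Int) + 1))], (i : Int)) := by
          by_cases h0 : c = 0 <;> simp [cut2Step, hgl, h0] <;> simp [h0] at hcz <;> omega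
        rw [hstep, hcast, ih (i + 1) 0 0 (i : Int) _ (by omega)]
        rw [if_pos hc, if_pos hcz]
        simp [buildB, List.append_assoc]
      · rw [hcons]
        simp only [List.foldl_cons]
        have hstep : cut2Step s (c, z, cutting, start) (i : Int) =
            (c, if c ≠ 0 then z + 1 else z, cutting, start) := by
          by_cases h0 : c = 0 <;> simp [cut2Step, hgl, h0] <;> simp [h0] at hcz <;> omega
        rw [hstep, hcast, ih (i + 1) c (if c ≠ 0 then z + 1 else z) start cutting (by omega)]
        rw [if_pos hc, if_neg hcz]
    · -- a non-zero character: state becomes (1, 0), nothing is appended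
      rw [hcons]
      simp only [List.foldl_cons]
      have hgl : s.toList[i]? = some s.toList[i] := List.getElem?_eq_getElem hil
      have hstep : cut2Step s (c, z, cutting, start) (i : Int) = (1, 0, cutting, start) := by
        simp [cut2Step, hgl, hc]
      rw [hstep, hcast, ih (i + 1) 1 0 start cutting (by omega)]
      rw [if_neg hc]

-- ===== VERDICT (by name: the statement is the Claim_ definition above) =====
theorem cut2_spec : Claim_equal_cut2 := by
  intro s _
  unfold Spec_cut2 cut2 cut2_alt
  have := fold_eq_build s s.toList.length 0 0 0 0 [] (by simp)
  simpa [cutsA_init s.toList] using this
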